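-- pv_equiv track=rewrite | github.com/atulanandnitt/django_basics | src/base_app/services/questions_bank/basicDataStructure/string/@anagram_of_string.py | checkInclusion
-- ===== SOURCE A (Python) =====
-- def checkInclusion(s1: str, s2: str) -> bool:
--     # if len(s2) < len(s1):
--     #     s1, s2 = s2, s1
--     s1_d = {key: s1.count(key) for key in set(s1)}
--     sol = list()
--     for i, item in enumerate(s2):
--         temp_s2 = s2[i:i+len(s1)]
--         temp_s2_d = {key: temp_s2.count(key) for key in set(temp_s2)}
--         if temp_s2_d == s1_d:
--             return True
--     return False
-- ===== SOURCE B (Python) =====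
-- def checkInclusion(s1: str, s2: str) -> bool:
--     n, m = len(s1), len(s2)
--     if m < n:
--         return False
--     need = {}
--     for c in s1:
--         need[c] = need.get(c, 0) + 1
--     window = {}
--     for c in s2[:n]:
--         window[c] = window.get(c, 0) + 1
--     if window == need:
--         return True
--     for out_c, in_c in zip(s2, s2[n:]):
--         window[in_c] = window.get(in_c, 0) + 1
--         if window[out_c] == 1:
--             del window[out_c]
--         else:
--             window[out_c] -= 1
--         if window == need:
--             return True
--     return False
-- ===== Notes on version B (the rewrite author's own statement) =====
-- stated objective: faster
-- what changed: A rebuilds a character-count dict for every start position and compares it to s1's counts (O(n*m) work); B slides a window of length len(s1) across s2 once, updating one count dict incrementally (add entering char, remove leaving char) and comparing after each slide.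
-- intended difference: On the single input s1='' and s2='' A returns False (its loop over s2 never runs), while B returns True, the intended value: the empty string trivially contains a permutation of the empty string (A itself returns True for s1='' with any non-empty s2). — e.g. on checkInclusion("", ""): A returns false, B returns true
import Mathlib
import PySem

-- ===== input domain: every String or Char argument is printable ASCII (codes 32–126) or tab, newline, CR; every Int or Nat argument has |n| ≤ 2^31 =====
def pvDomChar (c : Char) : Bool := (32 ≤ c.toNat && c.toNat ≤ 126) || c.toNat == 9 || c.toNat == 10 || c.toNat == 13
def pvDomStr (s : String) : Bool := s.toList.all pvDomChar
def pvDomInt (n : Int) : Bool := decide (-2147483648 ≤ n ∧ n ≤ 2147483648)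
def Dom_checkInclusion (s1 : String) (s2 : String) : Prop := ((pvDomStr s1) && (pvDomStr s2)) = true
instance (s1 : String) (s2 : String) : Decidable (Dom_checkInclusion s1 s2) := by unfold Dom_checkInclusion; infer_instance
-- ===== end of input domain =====

-- B replaces A's per-position dict rebuild with one incrementally updated sliding-window count dict (faster).

-- Python's `d1 == d2` on dicts: same size and every key/value pair of d1 found in d2 (order-insensitive).
-- Shared by both ports because both Pythons compare dicts with `==`.
def pyDictEq (d e : PySem.Dict Char Int) : Bool :=
  d.size == e.size && d.items.all (fun p => e.get? p.1 == some p.2)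

-- ===== PORT A =====
-- {key: l.count(key) for key in set(l)}  (keys are the distinct chars; `.count` of a 1-char string = char count;
-- the dict is only ever compared with `==`, which ignores order, so building over Set.ofList order is exact)
def counterOf (l : List Char) : PySem.Dict Char Int :=
  (PySem.Set.ofList l).foldl (fun d k => d.insert k ((l.count k : Nat) : Int)) PySem.Dict.empty

-- A's unused `sol = list()` is dead code and not ported.
def checkInclusion (s1 : String) (s2 : String) : Bool :=
  let s1l := s1.toList
  let s2l := s2.toList
  let s1d := counterOf s1l
  (PySem.List.enumerate s2l).any (fun p =>
    pyDictEq (counterOf (PySem.List.slice s2l (some p.1) (some (p.1 + (s1l.length : Int))))) s1d)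

-- ===== PORT B =====
-- need[c] = need.get(c, 0) + 1
def bump (w : PySem.Dict Char Int) (c : Char) : PySem.Dict Char Int :=
  w.insert c (w.getD c 0 + 1)

-- the `for out_c, in_c in zip(s2, s2[n:])` loop; Python's `window[out_c]` cannot raise because out_c is
-- inside the current window (count ≥ 1), so porting the lookup with getD _ 0 is exact.
def slideLoop (need : PySem.Dict Char Int) : PySem.Dict Char Int → List (Char × Char) → Bool
  | _, [] => false
  | w, (outc, inc) :: rest =>
    let w1 := bump w inc
    let w2 := if w1.getD outc 0 == 1 then w1.erase outc
              else w1.insert outc (w1.getD outc 0 - 1)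
    if pyDictEq w2 need then true else slideLoop need w2 rest

def checkInclusion_alt (s1 : String) (s2 : String) : Bool :=
  let s1l := s1.toList
  let s2l := s2.toList
  let n := s1l.length
  if s2l.length < n then false
  else
    let need := s1l.foldl bump PySem.Dict.empty
    let window := (PySem.List.slice s2l none (some (n : Int))).foldl bump PySem.Dict.empty
    if pyDictEq window need then true
    else slideLoop need window (s2l.zip (PySem.List.slice s2l (some (n : Int)) none))

-- ===== PRECONDITION & SPEC =====
-- On the single input s1 = "" and s2 = "" A returns False (its loop over s2 never runs) while B returns True,
-- the intended value: the empty string trivially contains a permutation of the empty string (A itself returns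
-- True for s1 = "" with any non-empty s2).
def D_checkInclusion (s1 : String) (s2 : String) : Prop := s1 = "" ∧ s2 = ""
instance (s1 : String) (s2 : String) : Decidable (D_checkInclusion s1 s2) := by unfold D_checkInclusion; infer_instance

def Spec_checkInclusion (s1 : String) (s2 : String) (out : Bool) : Prop := ¬ D_checkInclusion s1 s2 → out = checkInclusion_alt s1 s2
instance (s1 : String) (s2 : String) (out : Bool) : Decidable (Spec_checkInclusion s1 s2 out) := by unfold Spec_checkInclusion; infer_instance

def pvDiffWitness_checkInclusion : String × String := ("", "")
def pvDiffWitnessOut_checkInclusion : Bool × Bool := (false, true)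

-- ===== CLAIM (what is proved, stated in full; the proofs are below) =====
def Claim_unchanged_checkInclusion : Prop := ∀ (s1 : String) (s2 : String), Dom_checkInclusion s1 s2 → Spec_checkInclusion s1 s2 (checkInclusion s1 s2)
def Claim_changed_checkInclusion : Prop := Dom_checkInclusion (pvDiffWitness_checkInclusion.1) (pvDiffWitness_checkInclusion.2) ∧ D_checkInclusion (pvDiffWitness_checkInclusion.1) (pvDiffWitness_checkInclusion.2) ∧ checkInclusion (pvDiffWitness_checkInclusion.1) (pvDiffWitness_checkInclusion.2) = pvDiffWitnessOut_checkInclusion.1 ∧ checkInclusion_alt (pvDiffWitness_checkInclusion.1) (pvDiffWitness_checkInclusion.2) = pvDiffWitnessOut_checkInclusion.2 ∧ pvDiffWitnessOut_checkInclusion.1 ≠ pvDiffWitnessOut_checkInclusion.2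
def Claim_exact_checkInclusion : Prop := ∀ (s1 : String) (s2 : String), Dom_checkInclusion s1 s2 → D_checkInclusion s1 s2 → checkInclusion s1 s2 ≠ checkInclusion_alt s1 s2

-- ===== LEMMAS AND PROOFS =====

-- `if count = 0 then absent else present with that count`: the shape of every dict in either port.
def cif (x : Nat) : Option Int := if x = 0 then none else some ((x : Nat) : Int)

theorem cif_getD (x : Nat) : (cif x).getD 0 = ((x : Nat) : Int) := by
  unfold cif; split_ifs with h <;> simp [h]

theorem cif_inj {a b : Nat} (h : cif a = cif b) : a = b := by
  unfold cif at h
  split_ifs at h with h1 h2 h2 <;> simp_all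

-- A's per-window check, the common reference point of both sides.
def achk (s1l s2l : List Char) (n i : Nat) : Bool :=
  pyDictEq (counterOf ((s2l.drop i).take n)) (counterOf s1l)

theorem counterOf_items (l : List Char) :
    (counterOf l).items = (PySem.Set.ofList l).map (fun k => (k, ((l.count k : Nat) : Int))) := by
  unfold counterOf
  rw [PySem.Dict.items_foldl_insert_fresh _ _ _ _ (by intro a _; exact PySem.Dict.contains_empty a)
      (by simpa using PySem.Set.nodup_ofList l)]
  simp [PySem.Dict.empty]

theorem counterOf_keys (l : List Char) : (counterOf l).keys = PySem.Set.ofList l := by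
  simp only [PySem.Dict.keys, counterOf_items, List.map_map]
  exact List.map_id'' (congrFun rfl) (PySem.Set.ofList l)

theorem counterOf_nodup (l : List Char) : (counterOf l).keys.Nodup := by
  rw [counterOf_keys]; exact PySem.Set.nodup_ofList l

theorem counterOf_get? (l : List Char) (c : Char) : (counterOf l).get? c = cif (l.count c) := by
  unfold cif
  by_cases hc : c ∈ l
  · rw [if_neg (by simpa [List.count_eq_zero] using hc)]
    refine PySem.Dict.get?_of_mem_items _ ?_ (counterOf_nodup l)
    rw [counterOf_items]
    exact List.mem_map.2 ⟨c, (PySem.Set.mem_ofList l c).2 hc, rfl⟩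
  · rw [if_pos (List.count_eq_zero.2 hc)]
    refine (PySem.Dict.get?_eq_none_iff_not_mem_keys _ _).2 ?_
    rw [counterOf_keys]
    exact fun h => hc ((PySem.Set.mem_ofList l c).1 h)

theorem counterOf_eq_counter (l : List Char) : counterOf l = PySem.Dict.counter l := by
  apply PySem.Dict.ext
  rw [counterOf_items, PySem.Dict.items_counter]

theorem pyDictEq_iff (d e : PySem.Dict Char Int) (hd : d.keys.Nodup) (he : e.keys.Nodup) :
    pyDictEq d e = true ↔ ∀ k, d.get? k = e.get? k := by
  unfold pyDictEq
  simp only [Bool.and_eq_true, beq_iff_eq, List.all_eq_true]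
  constructor
  · rintro ⟨hsz, hall⟩ k
    have hsub : ∀ x ∈ d.keys, x ∈ e.keys := by
      intro x hx
      obtain ⟨p, hp, rfl⟩ := List.mem_map.1 hx
      have := hall p hp
      have : e.get? p.1 ≠ none := by simp [this]
      by_contra hxe
      exact this ((PySem.Dict.get?_eq_none_iff_not_mem_keys e p.1).2 hxe)
    have hlen : d.keys.length = e.keys.length := by
      simp only [PySem.Dict.keys, List.length_map]; exact hsz
    have hfs : d.keys.toFinset = e.keys.toFinset := by
      apply Finset.eq_of_subset_of_card_le
      · intro x hx; simp only [List.mem_toFinset] at *; exact hsub x hx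
      · rw [List.toFinset_card_of_nodup hd, List.toFinset_card_of_nodup he, hlen]
    cases hdk : d.get? k with
    | none =>
      have hk : k ∉ d.keys := (PySem.Dict.get?_eq_none_iff_not_mem_keys d k).1 hdk
      have hk' : k ∉ e.keys := by
        intro hke
        apply hk
        have : k ∈ e.keys.toFinset := List.mem_toFinset.2 hke
        rw [← hfs] at this
        exact List.mem_toFinset.1 this
      exact ((PySem.Dict.get?_eq_none_iff_not_mem_keys e k).2 hk').symm
    | some v =>
      have := PySem.Dict.mem_items_of_get?_eq_some d hdk
      exact (hall _ this).symm
  · intro h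
    constructor
    · have hfs : d.keys.toFinset = e.keys.toFinset := by
        ext x
        simp only [List.mem_toFinset]
        constructor <;> intro hx
        · by_contra hxe
          have h1 := (PySem.Dict.get?_eq_none_iff_not_mem_keys e x).2 hxe
          have h2 := (PySem.Dict.get?_eq_none_iff_not_mem_keys d x).1 ((h x).trans h1)
          exact h2 hx
        · by_contra hxd
          have h1 := (PySem.Dict.get?_eq_none_iff_not_mem_keys d x).2 hxd
          have h2 := (PySem.Dict.get?_eq_none_iff_not_mem_keys e x).1 ((h x).symm.trans h1)
          exact h2 hx
      have : d.keys.length = e.keys.length := by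
        rw [← List.toFinset_card_of_nodup hd, ← List.toFinset_card_of_nodup he, hfs]
      simpa [PySem.Dict.keys, PySem.Dict.size] using this
    · rintro ⟨k, v⟩ hp
      rw [← h k]
      exact PySem.Dict.get?_of_mem_items d hp hd


theorem get?_erase (d : PySem.Dict Char Int) (k j : Char) :
    (d.erase k).get? j = if j = k then none else d.get? j := by
  obtain ⟨l⟩ := d
  simp only [PySem.Dict.erase, PySem.Dict.get?, List.find?_filter]
  by_cases h : j = k
  · subst h
    rw [List.find?_eq_none.2 (by intro p _; simp)]
    simp
  · have heq : (fun (a : Char × Int) => decide ((!a.1 == k) = true ∧ (a.1 == j) = true)) = (fun p => p.1 == j) := by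
      funext p
      by_cases hp : p.1 = j <;> simp [hp]
      intro hk; exact h (hk ▸ rfl)
    rw [heq]; simp [h]

theorem nodup_keys_erase (d : PySem.Dict Char Int) (k : Char) (h : d.keys.Nodup) :
    (d.erase k).keys.Nodup := by
  refine List.Nodup.sublist ?_ h
  simp only [PySem.Dict.keys, PySem.Dict.erase]
  exact List.Sublist.map _ List.filter_sublist

-- two dicts characterized by cif of counts compare exactly like A's fresh dicts
theorem pyDictEq_char (d e : PySem.Dict Char Int) (u v : List Char)
    (hd : ∀ c, d.get? c = cif (u.count c)) (he : ∀ c, e.get? c = cif (v.count c))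
    (hdn : d.keys.Nodup) (hen : e.keys.Nodup) :
    pyDictEq d e = pyDictEq (counterOf u) (counterOf v) := by
  have h1 : pyDictEq d e = true ↔ ∀ c, u.count c = v.count c := by
    rw [pyDictEq_iff d e hdn hen]
    constructor
    · intro h c; exact cif_inj ((hd c).symm.trans ((h c).trans (he c)))
    · intro h c; rw [hd c, he c, h c]
  have h2 : pyDictEq (counterOf u) (counterOf v) = true ↔ ∀ c, u.count c = v.count c := by
    rw [pyDictEq_iff _ _ (counterOf_nodup u) (counterOf_nodup v)]
    constructor
    · intro h c
      exact cif_inj ((counterOf_get? u c).symm.trans ((h c).trans (counterOf_get? v c)))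
    · intro h c; rw [counterOf_get? u c, counterOf_get? v c, h c]
  rw [Bool.eq_iff_iff, h1, h2]

theorem achk_false_of_short (s1l s2l : List Char) (n i : Nat) (hn : n = s1l.length)
    (hshort : s2l.length - i < n) : achk s1l s2l n i = false := by
  by_contra h
  rw [Bool.not_eq_false] at h
  unfold achk at h
  rw [pyDictEq_iff _ _ (counterOf_nodup _) (counterOf_nodup _)] at h
  have hcnt : ∀ c, ((s2l.drop i).take n).count c = s1l.count c := by
    intro c
    exact cif_inj ((counterOf_get? _ c).symm.trans ((h c).trans (counterOf_get? s1l c)))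
  have hperm : ((s2l.drop i).take n).Perm s1l := List.perm_iff_count.2 hcnt
  have := hperm.length_eq
  simp [List.length_take, List.length_drop] at this
  omega

theorem foldl_bump_eq_counter (l : List Char) :
    l.foldl bump PySem.Dict.empty = PySem.Dict.counter l := by
  rw [← PySem.Dict.foldl_insert_getD_add_one_eq_counter]
  rfl

theorem slideLoop_spec (s1l : List Char) (k : Nat) (hn : k + 1 = s1l.length)
    (need : PySem.Dict Char Int) (hneed : ∀ c, need.get? c = cif (s1l.count c))
    (hnd : need.keys.Nodup) :
    ∀ (t : List Char) (w : PySem.Dict Char Int),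
      (∀ c, w.get? c = cif ((t.take (k+1)).count c)) → w.keys.Nodup →
      slideLoop need w (t.zip (t.drop (k+1))) =
        (List.range (t.length - (k+1))).any (fun j => achk s1l t (k+1) (j+1)) := by
  intro t
  induction t with
  | nil => intro w hw hwn; simp [slideLoop]
  | cons a t' ih =>
    intro w hw hwn
    have hdc : (a :: t').drop (k+1) = t'.drop k := List.drop_succ_cons
    cases hd : t'.drop k with
    | nil =>
      have hlen : t'.length ≤ k := List.drop_eq_nil_iff.1 hd
      rw [hdc, hd]
      have h0 : (a :: t').length - (k+1) = 0 := by simp only [List.length_cons]; omega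
      rw [h0]
      simp [slideLoop]
    | cons b r =>
      have hk : k < t'.length := by
        by_contra hh
        rw [List.drop_eq_nil_iff.2 (by omega)] at hd; cases hd
      have hdg := List.drop_eq_getElem_cons hk
      rw [hd] at hdg
      have hb : b = t'[k] := by cases hdg; rfl
      have hr : r = t'.drop (k+1) := by cases hdg; rfl
      rw [hdc, hd, List.zip_cons_cons]
      -- windows
      have hucons : (a :: t').take (k+1) = a :: t'.take k := List.take_succ_cons
      have huapp : t'.take (k+1) = t'.take k ++ [b] := by
        rw [List.take_add_one, List.getElem?_eq_getElem hk, hb]; rfl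
      have hcnt : ∀ c : Char, (t'.take (k+1)).count c + (if c = a then 1 else 0)
          = ((a :: t').take (k+1)).count c + (if c = b then 1 else 0) := by
        intro c
        rw [hucons, huapp]
        have h1 : (t'.take k ++ [b]).count c = (t'.take k).count c + (if c = b then 1 else 0) := by
          rw [List.count_append]
          by_cases h : c = b
          · subst h; simp
          · have h' : ¬ b = c := fun hh => h hh.symm
            simp [h, h']
        have h2 : ((a :: t'.take k)).count c = (t'.take k).count c + (if c = a then 1 else 0) := by
          by_cases h : c = a
          · subst h; simp [List.count_cons]
          · have h' : ¬ a = c := fun hh => h hh.symm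
            simp [h, h']
        omega
      -- the bumped dict
      have hw1 : ∀ c, (bump w b).get? c
          = cif (((a :: t').take (k+1)).count c + (if c = b then 1 else 0)) := by
        intro c
        unfold bump
        rw [PySem.Dict.get?_insert]
        by_cases hcb : c = b
        · subst hcb
          rw [if_pos rfl, if_pos rfl]
          have hgd : w.getD c 0 = ((((a :: t').take (k+1)).count c : Nat) : Int) := by
            rw [PySem.Dict.getD_eq_get?_getD, hw c, cif_getD]
          rw [hgd]
          unfold cif
          rw [if_neg (by omega)]
          push_cast
          ring_nf
        · rw [if_neg hcb, if_neg hcb, Nat.add_zero, hw c]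
      have hw1n : (bump w b).keys.Nodup := PySem.Dict.nodup_keys_insert _ _ _ hwn
      have hua : 0 < ((a :: t').take (k+1)).count a := by
        rw [hucons]
        simp [List.count_cons]
      have hga : (bump w b).getD a 0
          = ((((a :: t').take (k+1)).count a + (if a = b then 1 else 0) : Nat) : Int) := by
        rw [PySem.Dict.getD_eq_get?_getD, hw1 a, cif_getD]
      -- one unfolding of the loop
      show (let w1 := bump w b;
            let w2 := if w1.getD a 0 == 1 then w1.erase a else w1.insert a (w1.getD a 0 - 1);
            if pyDictEq w2 need then true else slideLoop need w2 (t'.zip r)) = _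
      have hw2 : ∀ w2 : PySem.Dict Char Int,
          w2 = (if (bump w b).getD a 0 == 1 then (bump w b).erase a
                else (bump w b).insert a ((bump w b).getD a 0 - 1)) →
          (∀ c, w2.get? c = cif ((t'.take (k+1)).count c)) ∧ w2.keys.Nodup := by
        intro w2 hw2def
        by_cases hone : ((a :: t').take (k+1)).count a + (if a = b then 1 else 0) = 1
        · have hcond : ((bump w b).getD a 0 == 1) = true := by
            rw [hga, hone]; rfl
          rw [hcond, if_pos rfl] at hw2def
          subst hw2def
          refine ⟨?_, nodup_keys_erase _ _ hw1n⟩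
          intro c
          rw [get?_erase]
          by_cases hca : c = a
          · subst hca
            have hc0 : (t'.take (k+1)).count c = 0 := by
              have h := hcnt c
              rw [if_pos rfl] at h
              omega
            rw [if_pos rfl, hc0]
            rfl
          · rw [if_neg hca, hw1 c]
            have h := hcnt c
            rw [if_neg hca] at h
            congr 1
            omega
        · have hM : (((((a :: t').take (k+1)).count a + (if a = b then 1 else 0) : Nat)) : Int) ≠ 1 := by
            exact_mod_cast hone
          have hcond : ((bump w b).getD a 0 == 1) = false := by
            rw [hga]
            simpa using hM
          rw [hcond, if_neg (by simp)] at hw2def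
          subst hw2def
          refine ⟨?_, PySem.Dict.nodup_keys_insert _ _ _ hw1n⟩
          intro c
          rw [PySem.Dict.get?_insert]
          by_cases hca : c = a
          · subst hca
            have h := hcnt c
            rw [if_pos rfl] at h
            rw [← h] at hga
            have hne : (t'.take (k+1)).count c ≠ 0 := by omega
            rw [if_pos rfl, hga]
            unfold cif
            rw [if_neg hne]
            congr 1
            push_cast
            ring
          · rw [if_neg hca, hw1 c]
            have h := hcnt c
            rw [if_neg hca] at h
            congr 1
            omega
      obtain ⟨hw2g, hw2n⟩ := hw2 _ rfl
      have hchk : pyDictEq (if (bump w b).getD a 0 == 1 then (bump w b).erase a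
                else (bump w b).insert a ((bump w b).getD a 0 - 1)) need
          = achk s1l (a :: t') (k+1) 1 := by
        unfold achk
        rw [List.drop_succ_cons, List.drop_zero]
        exact pyDictEq_char _ _ _ _ hw2g hneed hw2n hnd
      have hlen2 : (a :: t').length - (k+1) = (t'.length - (k+1)) + 1 := by simp; omega
      rw [hlen2, List.range_succ_eq_map]
      simp only [List.any_cons, List.any_map]
      have hrest : slideLoop need (if (bump w b).getD a 0 == 1 then (bump w b).erase a
                else (bump w b).insert a ((bump w b).getD a 0 - 1)) (t'.zip r)
          = (List.range (t'.length - (k+1))).any (fun j => achk s1l t' (k+1) (j+1)) := by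
        rw [hr]
        exact ih _ hw2g hw2n
      show (if pyDictEq _ need then true else slideLoop need _ (t'.zip r)) = _
      cases hc : pyDictEq (if (bump w b).getD a 0 == 1 then (bump w b).erase a
                else (bump w b).insert a ((bump w b).getD a 0 - 1)) need
      · rw [hc] at hchk
        rw [if_neg (by simp [hc]), hrest]
        have : (fun j => achk s1l (a :: t') (k+1) (Nat.succ j + 1)) = (fun j => achk s1l t' (k+1) (j+1)) := by
          funext j
          unfold achk
          rw [show Nat.succ j + 1 = (j+1) + 1 from rfl, List.drop_succ_cons]
        simp only [Function.comp_def, this, ← hchk]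
        simp
      · rw [if_pos (by simp [hc])]
        rw [hc] at hchk
        simp [← hchk]

theorem any_zipIdx_snd (l : List Char) (g : Nat → Bool) :
    l.zipIdx.any (fun q => g q.2) = (List.range l.length).any g := by
  have h : l.zipIdx.map Prod.snd = List.range l.length := by
    simp [List.range_eq_range']
  rw [← h, List.any_map]
  rfl

theorem A_eq (s1 s2 : String) :
    checkInclusion s1 s2 =
      (List.range s2.toList.length).any (achk s1.toList s2.toList s1.toList.length) := by
  unfold checkInclusion
  dsimp only
  rw [PySem.List.enumerate_eq_zipIdx_map, List.any_map]
  rw [← any_zipIdx_snd s2.toList (achk s1.toList s2.toList s1.toList.length)]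
  apply PySem.List.any_congr_mem
  intro q _
  show pyDictEq (counterOf (PySem.List.slice s2.toList (some ((0 : Int) + (q.2 : Int)))
      (some ((0 : Int) + (q.2 : Int) + (s1.toList.length : Int))))) (counterOf s1.toList) = _
  rw [zero_add, PySem.List.slice_natCast_add]
  rfl

theorem main_eq (s1 s2 : String) (h : ¬ (s1.toList = [] ∧ s2.toList = [])) :
    checkInclusion s1 s2 = checkInclusion_alt s1 s2 := by
  rcases hs1 : s1.toList with _ | ⟨x, xs⟩
  · -- s1 empty: every A-window check is true; B's first check is true; s2 nonempty
    have hs2 : s2.toList ≠ [] := fun hh => h ⟨hs1, hh⟩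
    have hA : checkInclusion s1 s2 = true := by
      rw [A_eq, hs1]
      rcases hs2' : s2.toList with _ | ⟨y, ys⟩
      · exact absurd hs2' hs2
      · simp only [List.length_cons]
        rw [List.range_succ_eq_map]
        simp only [List.any_cons, Bool.or_eq_true]
        left
        unfold achk
        simp
        decide
    have hB : checkInclusion_alt s1 s2 = true := by
      unfold checkInclusion_alt
      dsimp only
      rw [hs1]
      simp only [List.length_nil, Nat.not_lt_zero, if_false]
      have hsl : PySem.List.slice s2.toList none (some ((0 : Nat) : Int)) = [] := by
        rw [PySem.List.slice_to_natCast]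
        simp
      rw [hsl]
      rfl
    rw [hA, hB]
  · -- s1 nonempty
    have hn1 : s1.toList.length = xs.length + 1 := by rw [hs1]; rfl
    rw [A_eq]
    unfold checkInclusion_alt
    dsimp only
    by_cases hmn : s2.toList.length < s1.toList.length
    · rw [if_pos hmn]
      refine List.any_eq_false.2 ?_
      intro i hi
      rw [Bool.not_eq_true]
      exact achk_false_of_short s1.toList s2.toList s1.toList.length i rfl
        (by have := List.mem_range.1 hi; omega)
    · rw [if_neg hmn]
      -- the need dict
      have hneedeq : s1.toList.foldl bump PySem.Dict.empty = counterOf s1.toList := by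
        rw [foldl_bump_eq_counter, counterOf_eq_counter]
      have hneedg : ∀ c, (s1.toList.foldl bump PySem.Dict.empty).get? c = cif (s1.toList.count c) := by
        intro c; rw [hneedeq]; exact counterOf_get? _ c
      have hneednd : (s1.toList.foldl bump PySem.Dict.empty).keys.Nodup := by
        rw [hneedeq]; exact counterOf_nodup _
      -- the initial window dict
      have hwin : (PySem.List.slice s2.toList none (some (s1.toList.length : Int))).foldl bump PySem.Dict.empty
          = counterOf (s2.toList.take s1.toList.length) := by
        rw [PySem.List.slice_to_natCast, foldl_bump_eq_counter, counterOf_eq_counter]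
      have hwing : ∀ c, ((PySem.List.slice s2.toList none (some (s1.toList.length : Int))).foldl bump PySem.Dict.empty).get? c
          = cif ((s2.toList.take s1.toList.length).count c) := by
        intro c; rw [hwin]; exact counterOf_get? _ c
      have hwinnd : ((PySem.List.slice s2.toList none (some (s1.toList.length : Int))).foldl bump PySem.Dict.empty).keys.Nodup := by
        rw [hwin]; exact counterOf_nodup _
      -- first check is achk 0
      have hchk0 : pyDictEq ((PySem.List.slice s2.toList none (some (s1.toList.length : Int))).foldl bump PySem.Dict.empty)
          (s1.toList.foldl bump PySem.Dict.empty) = achk s1.toList s2.toList s1.toList.length 0 := by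
        unfold achk
        rw [List.drop_zero]
        exact pyDictEq_char _ _ _ _ hwing hneedg hwinnd hneednd
      -- the slide loop
      have hslide : slideLoop (s1.toList.foldl bump PySem.Dict.empty)
            ((PySem.List.slice s2.toList none (some (s1.toList.length : Int))).foldl bump PySem.Dict.empty)
            (s2.toList.zip (PySem.List.slice s2.toList (some (s1.toList.length : Int)) none))
          = (List.range (s2.toList.length - s1.toList.length)).any
              (fun j => achk s1.toList s2.toList s1.toList.length (j+1)) := by
        rw [PySem.List.slice_from_natCast]
        have := slideLoop_spec s1.toList xs.length hn1.symm
          (s1.toList.foldl bump PySem.Dict.empty) hneedg hneednd s2.toList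
          ((PySem.List.slice s2.toList none (some (s1.toList.length : Int))).foldl bump PySem.Dict.empty)
          (by intro c; rw [hwing c, hn1]) hwinnd
        rw [← hn1] at this
        exact this
      -- split A's range
      have hsplit : (List.range s2.toList.length).any (achk s1.toList s2.toList s1.toList.length)
          = (List.range (s2.toList.length - s1.toList.length + 1)).any (achk s1.toList s2.toList s1.toList.length) := by
        have hm : s2.toList.length = (s2.toList.length - s1.toList.length + 1) + (s1.toList.length - 1) := by omega
        rw [hm, List.range_add, List.any_append]
        have htail : (List.map (fun x => s2.toList.length - s1.toList.length + 1 + x)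
            (List.range (s1.toList.length - 1))).any (achk s1.toList s2.toList s1.toList.length) = false := by
          rw [List.any_map]
          refine List.any_eq_false.2 ?_
          intro j hj
          have hjlt := List.mem_range.1 hj
          rw [Bool.not_eq_true]
          exact achk_false_of_short s1.toList s2.toList s1.toList.length
            (s2.toList.length - s1.toList.length + 1 + j) rfl (by omega)
        rw [← hm, htail]
        simp
      rw [hsplit, List.range_succ_eq_map]
      simp only [List.any_cons, List.any_map]
      rw [hchk0, hslide]
      cases hc : achk s1.toList s2.toList s1.toList.length 0 <;>
        simp [Function.comp_def, hc]

-- ===== VERDICT (by name: the statement is the Claim_ definition above) =====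
theorem checkInclusion_spec : Claim_unchanged_checkInclusion := by
  intro s1 s2 _ hD
  apply main_eq
  intro ⟨h1, h2⟩
  exact hD ⟨by cases s1 with | _ l => cases l <;> simp_all, by cases s2 with | _ l => cases l <;> simp_all⟩

theorem checkInclusion_changed : Claim_changed_checkInclusion := by
  unfold Claim_changed_checkInclusion; decide

theorem checkInclusion_tight : Claim_exact_checkInclusion := by
  intro s1 s2 _ hD
  obtain ⟨h1, h2⟩ := hD
  subst h1; subst h2
  decide
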